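-- pv_equiv track=rewrite | github.com/bunkerj/log-parser | src/methods/iplom.py | _get_unique_tokens
-- ===== SOURCE A (Python) =====
-- def _get_unique_tokens(tokenized_log_entries):
--     """
--     Returns a dict where the key is the token position
--     and the value is a set of unique tokens.
--     """
--     unique_tokens = {}
--     for log_entry in tokenized_log_entries:
--         for token_idx in range(len(log_entry)):
--             if token_idx not in unique_tokens:
--                 unique_tokens[token_idx] = set()
--             unique_tokens[token_idx].add(log_entry[token_idx])
--     return unique_tokens
-- ===== SOURCE B (Python) =====
-- def _get_unique_tokens(tokenized_log_entries):
--     """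
--     Columnar re-implementation: compute the max entry width, transpose the
--     ragged entries into per-position columns, and build each position's set
--     from its column in one go (instead of a row-major pass updating a dict).
--     """
--     width = 0
--     for entry in tokenized_log_entries:
--         width = max(width, len(entry))
--     columns = [[entry[i] for entry in tokenized_log_entries if i < len(entry)]
--                for i in range(width)]
--     return {i: set(column) for i, column in enumerate(columns)}
-- ===== Notes on version B (the rewrite author's own statement) =====
-- stated objective: alternative
-- what changed: Row-major nested loops updating a position-keyed dict of sets are replaced by a columnar pass: compute the max width, transpose the ragged entries into per-position columns, and build each position's set directly from its column.
import Mathlib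
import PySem

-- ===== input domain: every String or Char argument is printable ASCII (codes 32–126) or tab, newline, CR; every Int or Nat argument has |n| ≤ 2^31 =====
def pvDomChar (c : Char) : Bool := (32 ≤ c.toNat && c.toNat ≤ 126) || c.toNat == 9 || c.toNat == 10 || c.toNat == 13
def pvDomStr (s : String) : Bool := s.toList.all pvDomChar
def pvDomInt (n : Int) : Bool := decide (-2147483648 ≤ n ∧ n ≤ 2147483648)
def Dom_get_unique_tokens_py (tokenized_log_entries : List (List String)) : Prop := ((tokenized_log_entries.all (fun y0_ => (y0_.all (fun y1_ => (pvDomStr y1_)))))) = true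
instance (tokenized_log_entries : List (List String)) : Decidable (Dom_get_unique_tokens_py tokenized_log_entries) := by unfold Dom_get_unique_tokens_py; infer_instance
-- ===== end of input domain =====

-- B replaces A's row-major dict-of-sets accumulation by an explicit transpose into
-- per-position columns, building each position's set from its column (alternative
-- decomposition, same asymptotic cost).


-- ===== PORT A =====
-- literal port of A: for each entry, for token_idx in range(len(entry)):
--   if token_idx not in d: d[token_idx] = set();  d[token_idx].add(entry[token_idx])
-- entry[token_idx] is always in range here, ported as pyGetD with dummy default "".
def get_unique_tokens_py (tokenized_log_entries : List (List String)) : List (Int × List String) :=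
  (tokenized_log_entries.foldl
    (fun (d : PySem.Dict Int (PySem.Set String)) log_entry =>
      (PySem.List.pyRange 0 (log_entry.length : Int) 1).foldl
        (fun d token_idx =>
          let d' := if d.contains token_idx then d else d.insert token_idx PySem.Set.empty
          d'.modify token_idx PySem.Set.empty
            (fun s => PySem.Set.add s (PySem.List.pyGetD log_entry token_idx "")))
        d)
    PySem.Dict.empty).items

-- ===== PORT B =====
-- port of Source B: width = running max of entry lengths; columns = per-position
-- tokens of the entries long enough ('entry[i] ... if i < len(entry)' is e[i]?);
-- result = {i: set(column)} over enumerate(columns).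
def pvWidth (xss : List (List String)) : Nat :=
  xss.foldl (fun w e => max w e.length) 0

def pvColumns (xss : List (List String)) : List (List String) :=
  (List.range (pvWidth xss)).map (fun i => xss.filterMap (fun e => e[i]?))

def get_unique_tokens_py_alt (tokenized_log_entries : List (List String)) : List (Int × List String) :=
  (PySem.List.enumerate (pvColumns tokenized_log_entries)).map
    (fun p => (p.1, PySem.Set.ofList p.2))

-- ===== PRECONDITION & SPEC =====
def Spec_get_unique_tokens_py (tokenized_log_entries : List (List String)) (out : List (Int × List String)) : Prop := out = get_unique_tokens_py_alt tokenized_log_entries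
instance (tokenized_log_entries : List (List String)) (out : List (Int × List String)) : Decidable (Spec_get_unique_tokens_py tokenized_log_entries out) := by unfold Spec_get_unique_tokens_py; infer_instance

-- ===== CLAIM (what is proved, stated in full; the proofs are below) =====
def Claim_equal_get_unique_tokens_py : Prop := ∀ (tokenized_log_entries : List (List String)), Dom_get_unique_tokens_py tokenized_log_entries → Spec_get_unique_tokens_py tokenized_log_entries (get_unique_tokens_py tokenized_log_entries)

-- ===== LEMMAS AND PROOFS =====

-- the set of tokens seen at position i (B's column set)
def colSet (xss : List (List String)) (i : Nat) : PySem.Set String :=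
  PySem.Set.ofList (xss.filterMap (fun e => e[i]?))

lemma colSet_of_width_le (xss : List (List String)) (i : Nat) (h : pvWidth xss ≤ i) :
    colSet xss i = PySem.Set.empty := by
  have hlen : ∀ e ∈ xss, e.length ≤ pvWidth xss :=
    (PySem.List.le_foldl_max_nat xss List.length 0).2
  unfold colSet
  rw [List.filterMap_eq_nil_iff.2]
  · rfl
  · intro e he
    exact List.getElem?_eq_none (by have := hlen e he; omega)

-- dict-items helpers over an ascending key block (range' a k) of casted Nat keys
lemma pvFind_block (g : Nat → PySem.Set String) (n : Nat) :
    ∀ (k a : Nat),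
      List.find? (fun p => p.1 == (n : Int))
        ((List.range' a k).map (fun i : Nat => ((i : Int), g i)))
      = if a ≤ n ∧ n < a + k then some ((n : Int), g n) else none := by
  intro k
  induction k with
  | zero => intro a; simp
  | succ k ih =>
    intro a
    rw [List.range'_succ, List.map_cons]
    by_cases h : a = n
    · subst h
      rw [List.find?_cons_of_pos (by simp), if_pos (by omega)]
    · rw [List.find?_cons_of_neg (by simp [h]), ih (a + 1)]
      by_cases h2 : a + 1 ≤ n ∧ n < a + 1 + k
      · rw [if_pos h2, if_pos (by omega)]
      · rw [if_neg h2, if_neg (by omega)]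

lemma pvContains_block (g : Nat → PySem.Set String) (n K : Nat) :
    PySem.Dict.contains (PySem.Dict.mk ((List.range K).map (fun i : Nat => ((i : Int), g i)))) (n : Int)
      = decide (n < K) := by
  by_cases h : n < K
  · rw [decide_eq_true h]
    simp only [PySem.Dict.contains, List.any_map, List.any_eq_true]
    exact ⟨n, List.mem_range.2 h, by simp⟩
  · rw [decide_eq_false h]
    simp only [PySem.Dict.contains, List.any_map, List.any_eq_false]
    intro i hi
    have hi' := List.mem_range.1 hi
    simp only [Function.comp, beq_iff_eq, Int.natCast_inj]
    omega

lemma pvGetD_block (g : Nat → PySem.Set String) (n K : Nat) (h : n < K) :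
    PySem.Dict.getD (PySem.Dict.mk ((List.range K).map (fun i : Nat => ((i : Int), g i)))) (n : Int)
      PySem.Set.empty = g n := by
  simp only [PySem.Dict.getD, PySem.Dict.get?]
  rw [List.range_eq_range', pvFind_block g n K 0, if_pos (by omega)]
  rfl

lemma pvUpdate_block (g : Nat → PySem.Set String) (n K : Nat) (v : PySem.Set String) :
    ((List.range K).map (fun i : Nat => ((i : Int), g i))).map
        (fun p => if p.1 == (n : Int) then ((n : Int), v) else p)
      = (List.range K).map (fun i : Nat => ((i : Int), if i = n then v else g i)) := by
  rw [List.map_map]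
  apply List.map_congr_left
  intro i _
  by_cases h : i = n
  · subst h; simp
  · simp [Function.comp, h, show ¬ ((i:Int) = (n:Int)) by exact_mod_cast h]

-- how one appended entry changes a column set
lemma colSet_append (xs : List (List String)) (e : List String) (i : Nat) :
    colSet (xs ++ [e]) i
      = if i < e.length then PySem.Set.add (colSet xs i) (e.getD i "") else colSet xs i := by
  unfold colSet
  rw [List.filterMap_append]
  by_cases h : i < e.length
  · rw [if_pos h]
    have h1 : List.filterMap (fun e' : List String => e'[i]?) [e] = [e[i]] := by
      simp [List.getElem?_eq_getElem h]
    have h2 : e.getD i "" = e[i] := by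
      simp [List.getD, List.getElem?_eq_getElem h]
    rw [h1, h2]
    simp [PySem.Set.ofList, List.foldl_append]
  · rw [if_neg h]
    have h1 : List.filterMap (fun e' : List String => e'[i]?) [e] = [] := by
      simp [List.getElem?_eq_none (show e.length ≤ i by omega)]
    rw [h1, List.append_nil]

-- the inner loop of A over range(len e), applied to a block dict
lemma pvInner_block (e : List String) (M : Nat) (S : Nat → PySem.Set String)
    (hS : ∀ i, M ≤ i → S i = PySem.Set.empty) :
    ∀ n : Nat,
      (List.range n).foldl
        (fun d (i : Nat) =>
          let d' := if d.contains (i : Int) then d else d.insert (i : Int) PySem.Set.empty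
          d'.modify (i : Int) PySem.Set.empty
            (fun s => PySem.Set.add s (PySem.List.pyGetD e (i : Int) "")))
        (PySem.Dict.mk ((List.range M).map (fun i : Nat => ((i : Int), S i))))
      = PySem.Dict.mk ((List.range (max M n)).map
          (fun i : Nat => ((i : Int),
            if i < n then PySem.Set.add (S i) (e.getD i "") else S i))) := by
  intro n
  induction n with
  | zero => simp
  | succ n ih =>
    rw [List.range_succ, List.foldl_append, ih, List.foldl_cons, List.foldl_nil]
    by_cases hn : n < max M n
    · simp only [PySem.Dict.modify, PySem.Dict.insert, pvContains_block,
        decide_eq_true hn, if_true, pvGetD_block _ _ _ hn]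
      rw [pvUpdate_block]
      have hmax : max M (n + 1) = max M n := by omega
      rw [hmax]
      congr 1
      apply List.map_congr_left
      intro i hi
      have hi' := List.mem_range.1 hi
      by_cases hin : i = n
      · subst hin
        simp [PySem.List.pyGetD_natCast]
      · simp [hin, show (i < n + 1 ↔ i < n) by omega]
    · have hMn : M ≤ n := by omega
      have hKn : max M n = n := by omega
      rw [hKn] at *
      have hexp : ((List.range n).map (fun i : Nat => ((i : Int),
            if i < n then PySem.Set.add (S i) (e.getD i "") else S i))) ++ [((n : Int), PySem.Set.empty)]
          = (List.range (n + 1)).map (fun i : Nat => ((i : Int),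
            if i < n then PySem.Set.add (S i) (e.getD i "") else PySem.Set.empty)) := by
        rw [List.range_succ, List.map_append]
        have h1 : (List.range n).map (fun i : Nat => ((i : Int),
              if i < n then PySem.Set.add (S i) (e.getD i "") else S i))
            = (List.range n).map (fun i : Nat => ((i : Int),
              if i < n then PySem.Set.add (S i) (e.getD i "") else PySem.Set.empty)) := by
          apply List.map_congr_left
          intro i hi
          have hi' := List.mem_range.1 hi
          simp [if_pos hi']
        rw [h1]
        simp
      simp only [PySem.Dict.modify, PySem.Dict.insert, pvContains_block,
        decide_eq_false (lt_irrefl n), Bool.false_eq_true, if_false]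
      rw [hexp]
      simp only [pvContains_block,
        decide_eq_true (Nat.lt_succ_self n), if_true,
        pvGetD_block _ _ _ (Nat.lt_succ_self n)]
      rw [pvUpdate_block]
      have hmax : max M (n + 1) = n + 1 := by omega
      rw [hmax]
      congr 1
      apply List.map_congr_left
      intro i hi
      have hi' := List.mem_range.1 hi
      by_cases hin : i = n
      · subst hin
        rw [if_neg (lt_irrefl i), if_pos rfl, if_pos (Nat.lt_succ_self i), hS i hMn]
        simp [PySem.List.pyGetD_natCast]
      · have hlt : i < n := by omega
        simp [hin, hlt, show i < n + 1 by omega]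

lemma pvAfold (xss : List (List String)) :
    xss.foldl
      (fun (d : PySem.Dict Int (PySem.Set String)) log_entry =>
        (PySem.List.pyRange 0 (log_entry.length : Int) 1).foldl
          (fun d token_idx =>
            let d' := if d.contains token_idx then d else d.insert token_idx PySem.Set.empty
            d'.modify token_idx PySem.Set.empty
              (fun s => PySem.Set.add s (PySem.List.pyGetD log_entry token_idx "")))
          d)
      PySem.Dict.empty
    = PySem.Dict.mk ((List.range (pvWidth xss)).map (fun i : Nat => ((i : Int), colSet xss i))) := by
  induction xss using List.reverseRecOn with
  | nil => rfl
  | append_singleton xs e ih =>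
    rw [List.foldl_append, ih, List.foldl_cons, List.foldl_nil]
    rw [PySem.List.pyRange_zero_natCast, List.foldl_map]
    rw [pvInner_block e (pvWidth xs) (colSet xs) (colSet_of_width_le xs) e.length]
    have hw : pvWidth (xs ++ [e]) = max (pvWidth xs) e.length := by
      simp [pvWidth, List.foldl_append]
    rw [hw]
    congr 1
    apply List.map_congr_left
    intro i _
    rw [colSet_append]

lemma pvEnum_range' (α : Type) (f : Nat → α) :
    ∀ (k a : Nat),
      PySem.List.enumerate ((List.range' a k).map f) (a : Int)
      = (List.range' a k).map (fun i : Nat => ((i : Int), f i)) := by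
  intro k
  induction k with
  | zero => intro a; rfl
  | succ k ih =>
    intro a
    rw [List.range'_succ, List.map_cons, List.map_cons]
    show ((a : Int), f a) :: PySem.List.enumerate ((List.range' (a+1) k).map f) ((a : Int) + 1)
      = ((a : Int), f a) :: (List.range' (a+1) k).map (fun i : Nat => ((i : Int), f i))
    rw [show ((a : Int) + 1) = ((a + 1 : Nat) : Int) by push_cast; ring, ih (a + 1)]

lemma pvEnum_range (α : Type) (f : Nat → α) (n : Nat) :
    PySem.List.enumerate ((List.range n).map f) 0
      = (List.range n).map (fun i : Nat => ((i : Int), f i)) := by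
  rw [List.range_eq_range']
  simpa using pvEnum_range' α f n 0

-- ===== VERDICT (by name: the statement is the Claim_ definition above) =====
theorem get_unique_tokens_py_spec : Claim_equal_get_unique_tokens_py := by
  intro xss _
  unfold Spec_get_unique_tokens_py
  unfold get_unique_tokens_py get_unique_tokens_py_alt pvColumns
  rw [pvAfold]
  rw [pvEnum_range, List.map_map]
  apply List.map_congr_left
  intro i _
  simp [Function.comp, colSet]
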